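-- pv_equiv track=rewrite | github.com/superdecrypt-dev/autoscript-lite | account-portal/app/main.py | _default_import_key
-- ===== SOURCE A (Python) =====
-- def _import_label_key(label: str) -> str:
--     normalized = "".join(ch.lower() if ch.isalnum() else "-" for ch in str(label or "").strip())
--     while "--" in normalized:
--         normalized = normalized.replace("--", "-")
--     return normalized.strip("-") or "mode"
--
-- def _default_import_key(items: list[dict[str, str]]) -> str:
--     if not items:
--         return "mode"
--     priority = ("websocket", "tcp-tls", "httpupgrade", "xhttp", "grpc")
--     keyed = {str(item.get("label") or "").strip(): _import_label_key(str(item.get("label") or "")) for item in items}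
--     for preferred in priority:
--         for label, key in keyed.items():
--             if key == preferred:
--                 return key
--     first = str(items[0].get("label") or "").strip()
--     return keyed.get(first, "mode")
-- ===== SOURCE B (Python) =====
-- def _import_label_key(label: str) -> str:
--     normalized = "".join(ch.lower() if ch.isalnum() else "-" for ch in str(label or "").strip())
--     while "--" in normalized:
--         normalized = normalized.replace("--", "-")
--     return normalized.strip("-") or "mode"
--
-- def _default_import_key(items: list[dict[str, str]]) -> str:
--     if not items:
--         return "mode"
--     priority = ("websocket", "tcp-tls", "httpupgrade", "xhttp", "grpc")
--     keys = [_import_label_key(str(item.get("label") or "")) for item in items]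
--     best = keys[0]
--     best_rank = priority.index(best) if best in priority else len(priority)
--     for key in keys[1:]:
--         rank = priority.index(key) if key in priority else len(priority)
--         if rank < best_rank:
--             best, best_rank = key, rank
--     return best
-- ===== Notes on version B (the rewrite author's own statement) =====
-- stated objective: alternative
-- what changed: Replaced A's label-keyed dict plus priority-outer/items-inner nested scan by one pass computing each item's key and keeping the key of lowest priority rank (ties to first occurrence), which collapses to the first item's key when nothing matches.
import Mathlib
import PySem

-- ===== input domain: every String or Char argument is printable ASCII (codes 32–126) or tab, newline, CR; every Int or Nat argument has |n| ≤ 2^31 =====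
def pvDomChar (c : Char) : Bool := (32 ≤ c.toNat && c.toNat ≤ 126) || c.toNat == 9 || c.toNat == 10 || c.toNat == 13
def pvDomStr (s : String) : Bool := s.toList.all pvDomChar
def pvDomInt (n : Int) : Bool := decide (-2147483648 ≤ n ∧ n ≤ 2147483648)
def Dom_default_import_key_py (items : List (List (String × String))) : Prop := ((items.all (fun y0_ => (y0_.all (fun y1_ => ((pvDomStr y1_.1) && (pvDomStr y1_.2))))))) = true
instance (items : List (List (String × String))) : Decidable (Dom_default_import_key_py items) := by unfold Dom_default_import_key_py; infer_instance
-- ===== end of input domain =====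

-- B replaces A's label-keyed dict plus priority-outer/items-inner nested scan by one map
-- pass computing each item's key followed by a recursive min-rank reduction (ties to first
-- occurrence); an alternative decomposition, not claimed faster.

-- ===== SHARED HELPER (both Pythons contain the same _import_label_key) =====
-- the Python `while "--" in normalized` loop; fuel s.length + 1 suffices because each
-- replace of "--" by "-" strictly shortens the list, so the loop runs at most s.length times.
def collapseGo : Nat → List Char → List Char
  | 0, s => s
  | fuel + 1, s =>
    if PySem.Chars.isIn ['-', '-'] s then collapseGo fuel (PySem.Chars.replace s ['-', '-'] ['-'])
    else s

-- body of _import_label_key after the initial .strip()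
def keyCore (s : List Char) : List Char :=
  let normalized := s.map (fun c => if PySem.Chars.isalnum c then PySem.Chars.lowerChar c else '-')
  let collapsed := collapseGo (normalized.length + 1) normalized
  let r := PySem.Chars.stripChars collapsed ['-']
  if r.isEmpty then "mode".toList else r

def importLabelKey (label : String) : String :=
  String.ofList (keyCore (PySem.Str.strip label).toList)

-- str(item.get("label") or "")
def labelOf (item : List (String × String)) : String :=
  ((PySem.Dict.mk item).get? "label").getD ""

-- ===== PORT A =====
def innerFind (preferred : String) : List (String × String) → Option String
  | [] => none
  | (_, key) :: rest => if key == preferred then some key else innerFind preferred rest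

def priorityLoop : List String → List (String × String) → Option String
  | [], _ => none
  | p :: ps, pairs =>
    match innerFind p pairs with
    | some k => some k
    | none => priorityLoop ps pairs

def default_import_key_py (items : List (List (String × String))) : String :=
  match items with
  | [] => "mode"
  | it0 :: rest =>
    let priority : List String := ["websocket", "tcp-tls", "httpupgrade", "xhttp", "grpc"]
    let keyed : PySem.Dict String String :=
      (it0 :: rest).foldl
        (fun d item => d.insert (PySem.Str.strip (labelOf item)) (importLabelKey (labelOf item)))
        PySem.Dict.empty
    match priorityLoop priority keyed.items with
    | some k => k
    | none =>
      let first := PySem.Str.strip (labelOf it0)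
      (keyed.get? first).getD "mode"

-- ===== PORT B =====
def priorityB : List String := ["websocket", "tcp-tls", "httpupgrade", "xhttp", "grpc"]

-- the `for key in keys[1:]` loop: carry (best, best_rank), keep the strictly smaller rank
def pickBest : List String → String → Nat → String
  | [], best, _ => best
  | k :: ks, best, bestRank =>
    let rank := (PySem.List.index? priorityB k).getD priorityB.length
    if rank < bestRank then pickBest ks k rank else pickBest ks best bestRank

def default_import_key_py_alt (items : List (List (String × String))) : String :=
  match items with
  | [] => "mode"
  | it0 :: rest =>
    let k0 := importLabelKey (labelOf it0)
    let tailKeys := rest.map (fun item => importLabelKey (labelOf item))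
    pickBest tailKeys k0 ((PySem.List.index? priorityB k0).getD priorityB.length)

-- ===== PRECONDITION & SPEC =====
def Spec_default_import_key_py (items : List (List (String × String))) (out : String) : Prop := out = default_import_key_py_alt items
instance (items : List (List (String × String))) (out : String) : Decidable (Spec_default_import_key_py items out) := by unfold Spec_default_import_key_py; infer_instance

-- ===== CLAIM (what is proved, stated in full; the proofs are below) =====
def Claim_equal_default_import_key_py : Prop := ∀ (items : List (List (String × String))), Dom_default_import_key_py items → Spec_default_import_key_py items (default_import_key_py items)

-- ===== LEMMAS AND PROOFS =====

-- abbreviations used only by the proofs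
def fKey (item : List (String × String)) : String := importLabelKey (labelOf item)
def sKey (item : List (String × String)) : String := PySem.Str.strip (labelOf item)
def gKey (k : String) : String := String.ofList (keyCore k.toList)

theorem fKey_eq_gKey_sKey (item : List (String × String)) : fKey item = gKey (sKey item) := rfl

def rankOf (key : String) : Nat :=
  (PySem.List.index? priorityB key).getD priorityB.length

-- step function equivalent to one iteration of B's loop, and the running minimum it maintains
def stepK (best : String × Nat) (k : String) : String × Nat :=
  if rankOf k < best.2 then (k, rankOf k) else best

def mfold (ks : List String) (bk : String) : Nat :=
  (ks.map rankOf).foldl min (rankOf bk)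

-- ----- inner/outer loop of A -----
theorem innerFind_eq (p : String) (pairs : List (String × String)) :
    innerFind p pairs = if p ∈ pairs.map Prod.snd then some p else none := by
  induction pairs with
  | nil => simp [innerFind]
  | cons q t ih =>
    obtain ⟨a, b⟩ := q
    by_cases hb : b = p
    · subst hb; simp [innerFind]
    · have hpb : p ≠ b := fun he => hb he.symm
      rw [innerFind]
      simp only [beq_iff_eq, hb, if_false, ih, List.map_cons]
      by_cases hmem : p ∈ List.map Prod.snd t
      · simp [hmem, List.mem_cons]
      · simp [hmem, List.mem_cons, hpb]

theorem priorityLoop_eq (ps : List String) (pairs : List (String × String)) :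
    priorityLoop ps pairs = ps.find? (fun p => decide (p ∈ pairs.map Prod.snd)) := by
  induction ps with
  | nil => simp [priorityLoop]
  | cons p t ih =>
    rw [priorityLoop, innerFind_eq]
    by_cases hm : p ∈ pairs.map Prod.snd
    · simp [hm, List.find?_cons_of_pos]
    · simp [hm, ih, List.find?_cons_of_neg]

-- ----- the dict A builds -----
def buildDict (items : List (List (String × String))) (d : PySem.Dict String String) :
    PySem.Dict String String :=
  items.foldl (fun d item => d.insert (sKey item) (gKey (sKey item))) d

theorem buildDict_snd_eq (items : List (List (String × String))) :
    ∀ d : PySem.Dict String String, (∀ q ∈ d.items, q.2 = gKey q.1) →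
      ∀ q ∈ (buildDict items d).items, q.2 = gKey q.1 := by
  induction items with
  | nil => intro d hd q hq; exact hd q hq
  | cons it t ih =>
    intro d hd q hq
    refine ih _ ?_ q hq
    intro r hr
    rcases (PySem.Dict.mem_items_insert d (sKey it) (gKey (sKey it)) r).mp hr with h | h
    · subst h; rfl
    · exact hd r h.1

theorem mem_keys_buildDict (items : List (List (String × String)))
    (d : PySem.Dict String String) (y : String) :
    y ∈ (buildDict items d).keys ↔ y ∈ d.keys ∨ y ∈ items.map sKey := by
  rw [buildDict, PySem.Dict.keys_foldl_insert_key items sKey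
    (fun _ it => gKey (sKey it)) d]
  exact PySem.Set.mem_update d.keys (items.map sKey) y

theorem mem_vals_buildDict (items : List (List (String × String))) (p : String) :
    p ∈ (buildDict items PySem.Dict.empty).items.map Prod.snd ↔ p ∈ items.map fKey := by
  constructor
  · rintro hp
    rcases List.mem_map.mp hp with ⟨q, hq, rfl⟩
    have h2 : q.2 = gKey q.1 := buildDict_snd_eq items PySem.Dict.empty (by simp [PySem.Dict.empty]) q hq
    have h1 : q.1 ∈ (buildDict items PySem.Dict.empty).keys := PySem.Dict.mem_keys_of_mem_items _ hq
    rcases (mem_keys_buildDict items PySem.Dict.empty q.1).mp h1 with h | h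
    · simp [PySem.Dict.empty, PySem.Dict.keys] at h
    · rcases List.mem_map.mp h with ⟨it, hit, hsk⟩
      exact List.mem_map.mpr ⟨it, hit, by rw [fKey_eq_gKey_sKey, hsk, ← h2]⟩
  · rintro hp
    rcases List.mem_map.mp hp with ⟨it, hit, rfl⟩
    have h1 : sKey it ∈ (buildDict items PySem.Dict.empty).keys :=
      (mem_keys_buildDict items PySem.Dict.empty (sKey it)).mpr
        (Or.inr (List.mem_map.mpr ⟨it, hit, rfl⟩))
    simp only [PySem.Dict.keys] at h1
    rcases List.mem_map.mp h1 with ⟨q, hq, hq1⟩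
    have h2 : q.2 = gKey q.1 := buildDict_snd_eq items PySem.Dict.empty (by simp [PySem.Dict.empty]) q hq
    refine List.mem_map.mpr ⟨q, hq, ?_⟩
    rw [h2, hq1, fKey_eq_gKey_sKey]

theorem get?_buildDict (items : List (List (String × String)))
    (it0 : List (String × String)) (h0 : it0 ∈ items) :
    (buildDict items PySem.Dict.empty).get? (sKey it0) = some (fKey it0) := by
  have hnd : (buildDict items PySem.Dict.empty).keys.Nodup := by
    rw [buildDict]
    exact PySem.Dict.nodup_keys_foldl_insert_key items sKey
      (fun _ it => gKey (sKey it)) PySem.Dict.empty PySem.Dict.nodup_keys_empty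
  have h1 : sKey it0 ∈ (buildDict items PySem.Dict.empty).keys :=
    (mem_keys_buildDict items PySem.Dict.empty (sKey it0)).mpr
      (Or.inr (List.mem_map.mpr ⟨it0, h0, rfl⟩))
  simp only [PySem.Dict.keys] at h1
  rcases List.mem_map.mp h1 with ⟨q, hq, hq1⟩
  have h2 : q.2 = gKey q.1 := buildDict_snd_eq items PySem.Dict.empty (by simp [PySem.Dict.empty]) q hq
  have : (sKey it0, fKey it0) ∈ (buildDict items PySem.Dict.empty).items := by
    have : q = (sKey it0, fKey it0) := by
      rw [fKey_eq_gKey_sKey, ← hq1, ← h2]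
    rwa [← this]
  exact (PySem.Dict.get?_eq_some_iff_mem_items _ _ _ hnd).mpr this

-- ----- characterization of A -----
theorem A_char (it0 : List (String × String)) (rest : List (List (String × String))) :
    default_import_key_py (it0 :: rest)
      = (priorityB.find? (fun p => decide (p ∈ (it0 :: rest).map fKey))).getD (fKey it0) := by
  show (match priorityLoop priorityB (buildDict (it0 :: rest) PySem.Dict.empty).items with
    | some k => k
    | none => ((buildDict (it0 :: rest) PySem.Dict.empty).get? (sKey it0)).getD "mode")
    = _
  rw [priorityLoop_eq]
  have hpred : (fun p => decide (p ∈ (buildDict (it0 :: rest) PySem.Dict.empty).items.map Prod.snd))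
      = (fun p => decide (p ∈ (it0 :: rest).map fKey)) := by
    funext p
    exact decide_eq_decide.mpr (mem_vals_buildDict (it0 :: rest) p)
  rw [hpred]
  cases hf : priorityB.find? (fun p => decide (p ∈ (it0 :: rest).map fKey)) with
  | some k => simp
  | none => simp [get?_buildDict (it0 :: rest) it0 (List.mem_cons_self)]

-- ----- rank facts -----
theorem rankOf_le5 (k : String) : rankOf k ≤ 5 := by
  rw [rankOf]
  cases h : PySem.List.index? priorityB k with
  | none => simp [priorityB]
  | some i =>
    rcases PySem.List.getElem_of_index?_eq_some h with ⟨hi, _, _⟩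
    have h5 : priorityB.length = 5 := rfl
    simp only [Option.getD_some]
    omega

theorem rankOf_index? (k : String) (h : rankOf k < 5) :
    PySem.List.index? priorityB k = some (rankOf k) := by
  unfold rankOf at h ⊢
  cases hi : PySem.List.index? priorityB k with
  | none => rw [hi] at h; simp [priorityB] at h
  | some i => simp

theorem rankOf_getElem (k : String) (h : rankOf k < 5) :
    ∃ hk : rankOf k < priorityB.length, priorityB[rankOf k] = k := by
  rcases PySem.List.getElem_of_index?_eq_some (rankOf_index? k h) with ⟨hk, he, _⟩
  exact ⟨hk, he⟩

theorem rankOf_getElem_le (j : ℕ) (hj : j < priorityB.length) : rankOf priorityB[j] ≤ j := by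
  have hmem : priorityB[j] ∈ priorityB := List.getElem_mem hj
  rw [rankOf]
  cases hi : PySem.List.index? priorityB (priorityB[j]) with
  | none => exact absurd hmem ((PySem.List.index?_eq_none_iff _ _).mp hi)
  | some i =>
    rcases PySem.List.getElem_of_index?_eq_some hi with ⟨hik, hie, hmin⟩
    simp only [Option.getD_some]
    by_contra hlt
    exact hmin j (by omega) rfl

theorem mem_priority_rank_lt (p : String) (hp : p ∈ priorityB) : rankOf p < 5 := by
  cases hi : PySem.List.index? priorityB p with
  | none => exact absurd hp ((PySem.List.index?_eq_none_iff _ _).mp hi)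
  | some i =>
    rcases PySem.List.getElem_of_index?_eq_some hi with ⟨hik, _, _⟩
    simp only [rankOf, hi, Option.getD_some]
    simpa [priorityB] using hik

-- ----- foldl-min facts -----
theorem fmin_le_init (l : List ℕ) (a : ℕ) : l.foldl min a ≤ a := by
  induction l generalizing a with
  | nil => simp
  | cons x t ih => exact le_trans (ih (min a x)) (min_le_left a x)

theorem fmin_le_mem (l : List ℕ) (a x : ℕ) (hx : x ∈ l) : l.foldl min a ≤ x := by
  induction l generalizing a with
  | nil => simp at hx
  | cons y t ih =>
    rcases List.mem_cons.mp hx with rfl | h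
    · exact le_trans (fmin_le_init t (min a x)) (min_le_right a x)
    · exact ih (min a y) h

theorem fmin_attain (l : List ℕ) (a : ℕ) : l.foldl min a = a ∨ l.foldl min a ∈ l := by
  induction l generalizing a with
  | nil => simp
  | cons x t ih =>
    rw [List.foldl_cons]
    rcases ih (min a x) with h | h
    · by_cases hax : a ≤ x
      · exact Or.inl (by rw [h, Nat.min_eq_left hax])
      · refine Or.inr ?_
        rw [h, Nat.min_eq_right (Nat.le_of_not_le hax)]
        exact List.mem_cons_self
    · exact Or.inr (List.mem_cons_of_mem x h)

-- an element of minimal rank is always found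
theorem achiever_isSome (ks : List String) (bk : String) :
    ((bk :: ks).find? (fun x => rankOf x == mfold ks bk)).isSome = true := by
  apply List.find?_isSome.mpr
  rcases fmin_attain (ks.map rankOf) (rankOf bk) with h | h
  · exact ⟨bk, List.mem_cons_self, by simp [mfold, h]⟩
  · rcases List.mem_map.mp h with ⟨k, hk, he⟩
    exact ⟨k, List.mem_cons_of_mem _ hk, by simp [mfold, he]⟩

-- B's recursive reducer is the fold of stepK
theorem pickBest_eq_fold (ks : List String) : ∀ (b : String) (r : ℕ),
    pickBest ks b r = (ks.foldl stepK (b, r)).1 := by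
  induction ks with
  | nil => intro b r; rfl
  | cons k t ih =>
    intro b r
    rw [pickBest, List.foldl_cons]
    show (if rankOf k < r then pickBest t k (rankOf k) else pickBest t b r) = _
    by_cases h : rankOf k < r
    · rw [if_pos h, ih, stepK, if_pos h]
    · rw [if_neg h, ih, stepK, if_neg h]

-- ----- characterization of B's fold -----
theorem foldK_char (ks : List String) : ∀ bk : String,
    ks.foldl stepK (bk, rankOf bk)
      = (((bk :: ks).find? (fun x => rankOf x == mfold ks bk)).getD bk,
         mfold ks bk) := by
  induction ks with
  | nil =>
    intro bk
    simp [mfold, List.find?_cons_of_pos]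
  | cons x r ih =>
    intro bk
    have hstep : stepK (bk, rankOf bk) x
        = if rankOf x < rankOf bk then (x, rankOf x) else (bk, rankOf bk) := rfl
    rw [List.foldl_cons, hstep]
    by_cases h : rankOf x < rankOf bk
    · rw [if_pos h]
      have hm : mfold (x :: r) bk = mfold r x := by
        simp only [mfold, List.map_cons, List.foldl_cons]
        congr 1
        omega
      have hml : mfold r x ≤ rankOf x := fmin_le_init _ _
      have hbk : ¬ ((rankOf bk == mfold r x) = true) := by
        simp only [beq_iff_eq]
        omega
      rw [ih x]
      refine Prod.ext ?_ hm.symm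
      simp only [hm]
      rw [List.find?_cons_of_neg (p := fun y => rankOf y == mfold r x)
        (a := bk) (l := x :: r) (by simpa using hbk)]
      have hs := achiever_isSome r x
      cases hfind : ((x :: r).find? (fun y => rankOf y == mfold r x)) with
      | none => rw [hfind] at hs; simp at hs
      | some y => simp
    · rw [if_neg h]
      have hm : mfold (x :: r) bk = mfold r bk := by
        simp only [mfold, List.map_cons, List.foldl_cons]
        congr 1
        omega
      rw [ih bk]
      refine Prod.ext ?_ hm.symm
      simp only [hm]
      by_cases hbk : (rankOf bk == mfold r bk) = true
      · rw [List.find?_cons_of_pos (p := fun y => rankOf y == mfold r bk)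
          (a := bk) (l := r) (by simpa using hbk)]
        rw [List.find?_cons_of_pos (p := fun y => rankOf y == mfold r bk)
          (a := bk) (l := x :: r) (by simpa using hbk)]
      · have hml : mfold r bk ≤ rankOf bk := fmin_le_init _ _
        have hfx : ¬ ((rankOf x == mfold r bk) = true) := by
          simp only [beq_iff_eq] at *
          omega
        rw [List.find?_cons_of_neg (p := fun y => rankOf y == mfold r bk)
          (a := bk) (l := r) (by simpa using hbk)]
        rw [List.find?_cons_of_neg (p := fun y => rankOf y == mfold r bk)
          (a := bk) (l := x :: r) (by simpa using hbk)]
        rw [List.find?_cons_of_neg (p := fun y => rankOf y == mfold r bk)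
          (a := x) (l := r) (by simpa using hfx)]

-- ----- bridge: first present priority = minimal-rank element -----
theorem bridge (k0 : String) (l : List String) :
    (priorityB.find? (fun p => decide (p ∈ k0 :: l))).getD k0
      = ((k0 :: l).find? (fun x => rankOf x == (l.map rankOf).foldl min (rankOf k0))).getD k0 := by
  set m := (l.map rankOf).foldl min (rankOf k0) with hm
  have hlow : ∀ x ∈ k0 :: l, m ≤ rankOf x := by
    intro x hx
    rcases List.mem_cons.mp hx with rfl | hx
    · exact fmin_le_init _ _
    · exact fmin_le_mem _ _ _ (List.mem_map.mpr ⟨x, hx, rfl⟩)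
  by_cases hml : m < 5
  · -- some priority key is present
    have hach : ∃ x ∈ k0 :: l, rankOf x = m := by
      rcases fmin_attain (l.map rankOf) (rankOf k0) with h | h
      · exact ⟨k0, List.mem_cons_self, by rw [hm]; exact h.symm⟩
      · rcases List.mem_map.mp h with ⟨x, hx, he⟩
        exact ⟨x, List.mem_cons_of_mem _ hx, by rw [hm]; exact he⟩
    rcases hach with ⟨x, hx, hrx⟩
    rcases rankOf_getElem x (by omega : rankOf x < 5) with ⟨hk, he⟩
    have hLHS : priorityB.find? (fun p => decide (p ∈ k0 :: l)) = some x := by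
      apply List.find?_eq_some_iff_getElem.mpr
      refine ⟨by simpa using hx, rankOf x, hk, he, ?_⟩
      intro j hj
      simp only [Bool.not_eq_eq_eq_not, Bool.not_true, decide_eq_false_iff_not]
      intro hmem
      have h1 := rankOf_getElem_le j (by omega)
      have h2 := hlow _ hmem
      omega
    have hs : ((k0 :: l).find? (fun y => rankOf y == m)).isSome = true :=
      List.find?_isSome.mpr ⟨x, hx, by simp [hrx]⟩
    cases hfind : (k0 :: l).find? (fun y => rankOf y == m) with
    | none => rw [hfind] at hs; simp at hs
    | some y =>
      have hy : rankOf y = m := by simpa using List.find?_some hfind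
      rcases rankOf_getElem y (by omega : rankOf y < 5) with ⟨hk', he'⟩
      have : y = x := by
        rw [← he, ← he']
        congr 1
        omega
      rw [hLHS, this]
  · -- no priority key present: fall back to the first item's key
    have hm5 : m = 5 := by
      have := hlow k0 List.mem_cons_self
      have := rankOf_le5 k0
      omega
    have hLHS : priorityB.find? (fun p => decide (p ∈ k0 :: l)) = none := by
      apply List.find?_eq_none.mpr
      intro p hp
      simp only [decide_eq_true_eq]
      intro hmem
      have := mem_priority_rank_lt p hp
      have := hlow p hmem
      omega
    have hk0 : rankOf k0 = m := by
      have := hlow k0 List.mem_cons_self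
      have := rankOf_le5 k0
      omega
    rw [hLHS, List.find?_cons_of_pos (p := fun y => rankOf y == m)
      (a := k0) (l := l) (by simp [hk0])]
    simp



theorem bridge' (k0 : String) (l : List String) :
    (priorityB.find? (fun p => decide (p ∈ k0 :: l))).getD k0
      = ((k0 :: l).find? (fun x => rankOf x == mfold l k0)).getD k0 := by
  unfold mfold
  exact bridge k0 l

theorem foldK_fst (ks : List String) (bk : String) :
    (ks.foldl stepK (bk, rankOf bk)).1
      = ((bk :: ks).find? (fun x => rankOf x == mfold ks bk)).getD bk := by
  rw [foldK_char]

-- ===== VERDICT (by name: the statement is the Claim_ definition above) =====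
theorem default_import_key_py_spec : Claim_equal_default_import_key_py := by
  intro items _
  unfold Spec_default_import_key_py
  cases items with
  | nil => rfl
  | cons it0 rest =>
    have hB : default_import_key_py_alt (it0 :: rest)
        = pickBest (rest.map fKey) (fKey it0) (rankOf (fKey it0)) := rfl
    rw [hB, pickBest_eq_fold, foldK_fst, A_char, List.map_cons, bridge']
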